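-- pv_equiv track=rewrite | github.com/fe-jcorreia/algorithms-and-data-structures | exercices/765-minSwapsCouples.py | minSwapsCouples
-- ===== SOURCE A (Python) =====
-- def minSwapsCouples(row):
--   n = len(row) // 2
--   graph = {}
--   coupleOf = {}
--
--   graphPermutationVertex = 0
--   for i in range(n):
--     coupleOf[2*i] = graphPermutationVertex
--     coupleOf[2*i + 1] = graphPermutationVertex
--     graph[graphPermutationVertex] = set()
--     graphPermutationVertex += 1
--
--   for p in range(n):
--     graph[coupleOf[row[2*p]]].add(coupleOf[row[2*p + 1]])
--     graph[coupleOf[row[2*p + 1]]].add(coupleOf[row[2*p]])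
--
--   parent = [i for i in range(len(graph))]
--   rank = [1] * len(graph)
--   def find(v):
--     p = parent[v]
--     while p != parent[p]:
--       parent[p] = parent[parent[p]]
--       p = parent[p]
--     return p
--
--   def union(n1, n2):
--     p1, p2 = find(n1), find(n2)
--     if p1 == p2:
--       return 0
--     if rank[p1] > rank[p2]:
--       parent[p2] = p1
--       rank[p1] += rank[p2]
--     else:
--       parent[p1] = p2
--       rank[p2] += rank[p1]
--     return 1
--
--   conComp = len(graph)
--   for src in graph:
--     for dst in graph[src]:
--       conComp -= union(src, dst)
--
--   return len(graph) - conComp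
-- ===== SOURCE B (Python) =====
-- def minSwapsCouples(row):
--     # component-labeling instead of union-find: relabel one component on each merge
--     n = len(row) // 2
--     label = list(range(n))
--     swaps = 0
--     for p in range(n):
--         la = label[row[2 * p] // 2]
--         lb = label[row[2 * p + 1] // 2]
--         if la != lb:
--             swaps += 1
--             label = [la if l == lb else l for l in label]
--     return swaps
-- ===== Notes on version B (the rewrite author's own statement) =====
-- stated objective: simpler
-- what changed: Replaces A's graph dict + union-find (rank, path halving) with direct component labeling: one label array over couples, relabeling one component's label on each merging pair; swap count is the number of merges.
import Mathlib
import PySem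

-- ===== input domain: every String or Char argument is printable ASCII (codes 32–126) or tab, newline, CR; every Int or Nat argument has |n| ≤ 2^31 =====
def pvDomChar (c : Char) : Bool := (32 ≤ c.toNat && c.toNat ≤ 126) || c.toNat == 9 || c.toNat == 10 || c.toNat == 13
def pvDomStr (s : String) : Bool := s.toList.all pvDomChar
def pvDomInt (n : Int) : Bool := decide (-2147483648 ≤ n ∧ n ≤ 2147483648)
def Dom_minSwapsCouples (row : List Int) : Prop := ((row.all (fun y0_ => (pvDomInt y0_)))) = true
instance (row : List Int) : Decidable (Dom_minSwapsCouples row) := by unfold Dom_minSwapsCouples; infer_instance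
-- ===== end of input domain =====

-- B replaces A's graph + union-find with direct component labeling (simpler, not faster);
-- equivalence is about return values (neither program mutates its argument).

-- ===== PORT A =====

-- the body of A's 'while p != parent[p]' loop inside find (fuel only makes it total;
-- the run never exhausts it on inputs satisfying Pre_)
def pvFindLoopA (fuel : Nat) (parent : List Int) (p : Int) : Int × List Int :=
  match fuel with
  | 0 => (p, parent)
  | f + 1 =>
    if p = PySem.List.pyGetD parent p 0 then (p, parent)
    else
      let parent' := PySem.List.pySetD parent p
        (PySem.List.pyGetD parent (PySem.List.pyGetD parent p 0) 0)
      pvFindLoopA f parent' (PySem.List.pyGetD parent' p 0)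

def pvFindA (parent : List Int) (v : Int) : Int × List Int :=
  pvFindLoopA parent.length parent (PySem.List.pyGetD parent v 0)

def pvUnionA (parent rank : List Int) (n1 n2 : Int) : Int × List Int × List Int :=
  let r1 := pvFindA parent n1
  let r2 := pvFindA r1.2 n2
  let p1 := r1.1
  let p2 := r2.1
  if p1 = p2 then (0, r2.2, rank)
  else if PySem.List.pyGetD rank p1 0 > PySem.List.pyGetD rank p2 0 then
    (1, PySem.List.pySetD r2.2 p2 p1,
        PySem.List.pySetD rank p1 (PySem.List.pyGetD rank p1 0 + PySem.List.pyGetD rank p2 0))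
  else
    (1, PySem.List.pySetD r2.2 p1 p2,
        PySem.List.pySetD rank p2 (PySem.List.pyGetD rank p2 0 + PySem.List.pyGetD rank p1 0))

def minSwapsCouples (row : List Int) : Int :=
  let n : Int := PySem.Int.floordiv (PySem.List.len row) 2
  let built := (PySem.List.pyRange 0 n 1).foldl
    (fun (st : PySem.Dict Int (PySem.Set Int) × PySem.Dict Int Int × Int) i =>
      ((st.1.insert st.2.2 PySem.Set.empty),
       ((st.2.1.insert (2 * i) st.2.2).insert (2 * i + 1) st.2.2),
       st.2.2 + 1))
    (PySem.Dict.empty, PySem.Dict.empty, 0)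
  let coupleOf := built.2.1
  let graph := (PySem.List.pyRange 0 n 1).foldl
    (fun g p =>
      let a := coupleOf.getD (PySem.List.pyGetD row (2 * p) 0) 0
      let b := coupleOf.getD (PySem.List.pyGetD row (2 * p + 1) 0) 0
      (g.modify a PySem.Set.empty (fun s => s.add b)).modify b PySem.Set.empty (fun s => s.add a))
    built.1
  let parent := PySem.List.pyRange 0 (graph.size : Int) 1
  let rank := PySem.List.pyRepeat [(1 : Int)] (graph.size : Int)
  let st := graph.keys.foldl
    (fun (st : List Int × List Int × Int) src =>
      (graph.getD src PySem.Set.empty).foldl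
        (fun (st : List Int × List Int × Int) dst =>
          let u := pvUnionA st.1 st.2.1 src dst
          (u.2.1, u.2.2, st.2.2 - u.1))
        st)
    (parent, rank, (graph.size : Int))
  (graph.size : Int) - st.2.2

-- ===== PORT B =====
def minSwapsCouples_alt (row : List Int) : Int :=
  let n : Int := PySem.Int.floordiv (PySem.List.len row) 2
  let st := (PySem.List.pyRange 0 n 1).foldl
    (fun (st : List Int × Int) p =>
      let la := PySem.List.pyGetD st.1
        (PySem.Int.floordiv (PySem.List.pyGetD row (2 * p) 0) 2) 0
      let lb := PySem.List.pyGetD st.1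
        (PySem.Int.floordiv (PySem.List.pyGetD row (2 * p + 1) 0) 2) 0
      if la ≠ lb then (st.1.map (fun l => if l = lb then la else l), st.2 + 1)
      else st)
    (PySem.List.pyRange 0 n 1, 0)
  st.2

-- ===== PRECONDITION & SPEC =====
-- Pre_ admits exactly the inputs where A returns: A raises KeyError as soon as some seated
-- value (among the first 2*(len//2) entries) is not a key of coupleOf, i.e. not in [0, 2*(len//2)).
def Pre_minSwapsCouples (row : List Int) : Prop :=
  ∀ x ∈ row.take (2 * (row.length / 2)), 0 ≤ x ∧ x < ((2 * (row.length / 2) : Nat) : Int)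

instance (row : List Int) : Decidable (Pre_minSwapsCouples row) := by
  unfold Pre_minSwapsCouples; infer_instance

def pvWitness_minSwapsCouples : List Int := [0, 2, 1, 3]

def Spec_minSwapsCouples (row : List Int) (out : Int) : Prop := out = minSwapsCouples_alt row
instance (row : List Int) (out : Int) : Decidable (Spec_minSwapsCouples row out) := by
  unfold Spec_minSwapsCouples; infer_instance

-- ===== CLAIM (what is proved, stated in full; the proofs are below) =====
def Claim_equal_minSwapsCouples : Prop :=
  ∀ (row : List Int), Dom_minSwapsCouples row → Pre_minSwapsCouples row →
    Spec_minSwapsCouples row (minSwapsCouples row)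


-- ===== LEMMAS AND PROOFS =====

-- ---- Int-indexed list access glue (nonnegative in-range indices) ----
lemma pv_getD_eq (xs : List Int) (i : Int) (h0 : 0 ≤ i) (h : i < (xs.length : Int)) :
    PySem.List.pyGetD xs i 0 = xs[i.toNat]'(by omega) := by
  exact PySem.List.pyGetD_eq_getElem xs 0 h0 (by simpa using h)

lemma pv_getD_set_self (xs : List Int) (i v : Int) (h0 : 0 ≤ i) (h : i < (xs.length : Int)) :
    PySem.List.pyGetD (PySem.List.pySetD xs i v) i 0 = v := by
  rw [PySem.List.pySetD_of_nonneg xs v h0,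
    PySem.List.pyGetD_eq_getElem _ 0 h0 (by simp; omega)]
  rw [List.getElem_set_self]

lemma pv_getD_set_ne (xs : List Int) (i j v : Int) (h0 : 0 ≤ i)
    (hj0 : 0 ≤ j) (hj : j < (xs.length : Int)) (hne : j ≠ i) :
    PySem.List.pyGetD (PySem.List.pySetD xs i v) j 0 = PySem.List.pyGetD xs j 0 := by
  rw [PySem.List.pySetD_of_nonneg xs v h0,
    PySem.List.pyGetD_eq_getElem _ 0 hj0 (by simp; omega),
    PySem.List.pyGetD_eq_getElem _ 0 hj0 (by omega),
    List.getElem_set_ne (by omega)]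

lemma pv_len_set (xs : List Int) (i v : Int) :
    (PySem.List.pySetD xs i v).length = xs.length :=
  PySem.List.length_pySetD xs i v

lemma pv_getD_pyRange (n i : Int) (h0 : 0 ≤ i) (h : i < n) :
    PySem.List.pyGetD (PySem.List.pyRange 0 n 1) i 0 = i := by
  rw [PySem.List.pyGetD_eq_getElem _ 0 h0
    (by rw [PySem.List.length_pyRange_one]; omega)]
  rw [PySem.List.getElem_pyRange_one]
  omega

-- ---- abstract partition machinery ----
def pvMerge (R : Int → Int) (u v : Int) : Int → Int := fun i => if R i = u then v else R i

def pvStep (E : List (Int × Int)) (x y : Int) : Prop := (x, y) ∈ E ∨ (y, x) ∈ E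

def pvCl (E : List (Int × Int)) : Int → Int → Prop := Relation.EqvGen (pvStep E)

def pvEOK (n : Int) (E : List (Int × Int)) : Prop :=
  ∀ e ∈ E, 0 ≤ e.1 ∧ e.1 < n ∧ 0 ≤ e.2 ∧ e.2 < n

def pvPartEq (n : Int) (R : Int → Int) (E : List (Int × Int)) : Prop :=
  ∀ x y, 0 ≤ x → x < n → 0 ≤ y → y < n → (R x = R y ↔ pvCl E x y)

noncomputable def pvCard (n : Int) (R : Int → Int) : Nat := ((Finset.Ico 0 n).image R).card

lemma pvCl_mono {E E' : List (Int × Int)} (h : ∀ x y, pvStep E x y → pvStep E' x y)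
    {x y : Int} : pvCl E x y → pvCl E' x y :=
  Relation.EqvGen.mono h

lemma pvCl_append {E : List (Int × Int)} (e : Int × Int) {x y : Int} :
    pvCl E x y → pvCl (E ++ [e]) x y := by
  refine pvCl_mono (fun x y hs => ?_)
  rcases hs with h | h
  · exact Or.inl (List.mem_append_left _ h)
  · exact Or.inr (List.mem_append_left _ h)

lemma pvCl_resp {E : List (Int × Int)} {R : Int → Int}
    (h : ∀ p q, pvStep E p q → R p = R q) {x y : Int} :
    pvCl E x y → R x = R y ∨ x = y := by
  intro hcl
  induction hcl with
  | rel p q hpq => exact Or.inl (h p q hpq)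
  | refl p => exact Or.inr rfl
  | symm p q _ ih => rcases ih with h1 | h1 <;> [exact Or.inl h1.symm; exact Or.inr h1.symm]
  | trans p q r _ _ ih1 ih2 =>
      rcases ih1 with h1 | h1 <;> rcases ih2 with h2 | h2
      · exact Or.inl (h1.trans h2)
      · exact Or.inl (h2 ▸ h1)
      · exact Or.inl (h1 ▸ h2)
      · exact Or.inr (h1.trans h2)

lemma pvPartEq_nil (n : Int) (R : Int → Int) (hid : ∀ x, 0 ≤ x → x < n → R x = x) :
    pvPartEq n R [] := by
  intro x y hx0 hx hy0 hy
  constructor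
  · intro hR
    have : x = y := by rw [← hid x hx0 hx, ← hid y hy0 hy]; exact hR
    exact this ▸ Relation.EqvGen.refl x
  · intro hcl
    rcases pvCl_resp (R := R) (fun p q hs => by
      rcases hs with h | h <;> simp at h) hcl with h | h
    · exact h
    · rw [h]

lemma pvPartEq_congr {n : Int} {R R' : Int → Int} {E : List (Int × Int)}
    (h : ∀ x, 0 ≤ x → x < n → R x = R' x) (hP : pvPartEq n R E) : pvPartEq n R' E := by
  intro x y hx0 hx hy0 hy
  rw [← h x hx0 hx, ← h y hy0 hy]
  exact hP x y hx0 hx hy0 hy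

lemma pvCard_congr {n : Int} {R R' : Int → Int}
    (h : ∀ x, 0 ≤ x → x < n → R x = R' x) : pvCard n R = pvCard n R' := by
  unfold pvCard
  congr 1
  refine Finset.image_congr (fun x hx => ?_)
  simp only [Finset.coe_Ico, Set.mem_Ico] at hx
  exact h x hx.1 hx.2

lemma pvPartEq_same {n : Int} {R : Int → Int} {E : List (Int × Int)} {a b : Int}
    (hE : pvEOK n E) (hP : pvPartEq n R E)
    (_ha : 0 ≤ a ∧ a < n) (_hb : 0 ≤ b ∧ b < n) (hab : R a = R b) :
    pvPartEq n R (E ++ [(a, b)]) := by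
  have hstep : ∀ p q, pvStep (E ++ [(a, b)]) p q → R p = R q := by
    intro p q hs
    rcases hs with h | h <;> rcases List.mem_append.1 h with h' | h'
    · exact (hP p q (hE _ h').1 (hE _ h').2.1 (hE _ h').2.2.1 (hE _ h').2.2.2).2
        (Relation.EqvGen.rel _ _ (Or.inl h'))
    · simp at h'; rw [h'.1, h'.2]; exact hab
    · exact ((hP q p (hE _ h').1 (hE _ h').2.1 (hE _ h').2.2.1 (hE _ h').2.2.2).2
        (Relation.EqvGen.rel _ _ (Or.inl h'))).symm
    · simp at h'; rw [h'.1, h'.2]; exact hab.symm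
  intro x y hx0 hx hy0 hy
  constructor
  · intro hR
    exact pvCl_append _ ((hP x y hx0 hx hy0 hy).1 hR)
  · intro hcl
    rcases pvCl_resp hstep hcl with h | h
    · exact h
    · rw [h]

lemma pvPartEq_merge {n : Int} {R : Int → Int} {E : List (Int × Int)} {a b u v : Int}
    (hE : pvEOK n E) (hP : pvPartEq n R E)
    (ha : 0 ≤ a ∧ a < n) (hb : 0 ≤ b ∧ b < n)
    (huv : (u = R a ∧ v = R b) ∨ (u = R b ∧ v = R a)) (hne : u ≠ v) :
    pvPartEq n (pvMerge R u v) (E ++ [(a, b)]) := by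
  obtain ⟨c1, c2, hc1, hc2, hcb1, hcb2, hedge⟩ :
      ∃ c1 c2, u = R c1 ∧ v = R c2 ∧ (0 ≤ c1 ∧ c1 < n) ∧ (0 ≤ c2 ∧ c2 < n) ∧
        pvStep (E ++ [(a, b)]) c1 c2 := by
    rcases huv with ⟨h1, h2⟩ | ⟨h1, h2⟩
    · exact ⟨a, b, h1, h2, ha, hb, Or.inl (by simp)⟩
    · exact ⟨b, a, h1, h2, hb, ha, Or.inr (by simp)⟩
  have hcl12 : pvCl (E ++ [(a, b)]) c1 c2 := Relation.EqvGen.rel _ _ hedge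
  have hclass : ∀ x, 0 ≤ x → x < n → ∀ c, 0 ≤ c → c < n → R x = R c →
      pvCl (E ++ [(a, b)]) x c :=
    fun x hx0 hx c hc0 hc hxc => pvCl_append _ ((hP x c hx0 hx hc0 hc).1 hxc)
  have hRab : pvMerge R u v a = pvMerge R u v b := by
    rcases huv with ⟨h1, h2⟩ | ⟨h1, h2⟩ <;>
      simp only [pvMerge, ← h1, ← h2] <;> simp [Ne.symm hne]
  have hstep : ∀ p q, pvStep (E ++ [(a, b)]) p q → pvMerge R u v p = pvMerge R u v q := by
    intro p q hs
    have hold : ∀ p' q', (p', q') ∈ E → pvMerge R u v p' = pvMerge R u v q' := by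
      intro p' q' hmem
      have hb' := hE _ hmem
      have : R p' = R q' := (hP p' q' hb'.1 hb'.2.1 hb'.2.2.1 hb'.2.2.2).2
        (Relation.EqvGen.rel _ _ (Or.inl hmem))
      simp only [pvMerge, this]
    rcases hs with hm | hm <;> rcases List.mem_append.1 hm with h' | h'
    · exact hold _ _ h'
    · simp at h'; rw [h'.1, h'.2]; exact hRab
    · exact (hold _ _ h').symm
    · simp at h'; rw [h'.1, h'.2]; exact hRab.symm
  intro x y hx0 hx hy0 hy
  constructor
  · intro hR
    by_cases hxu : R x = u <;> by_cases hyu : R y = u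
    · exact Relation.EqvGen.trans _ _ _
        (hclass x hx0 hx c1 hcb1.1 hcb1.2 (hxu.trans hc1))
        (Relation.EqvGen.symm _ _ (hclass y hy0 hy c1 hcb1.1 hcb1.2 (hyu.trans hc1)))
    · have hyv : R y = v := by simpa [pvMerge, hxu, hyu] using hR.symm
      exact Relation.EqvGen.trans _ _ _
        (hclass x hx0 hx c1 hcb1.1 hcb1.2 (hxu.trans hc1))
        (Relation.EqvGen.trans _ _ _ hcl12
          (Relation.EqvGen.symm _ _ (hclass y hy0 hy c2 hcb2.1 hcb2.2 (hyv.trans hc2))))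
    · have hxv : R x = v := by simpa [pvMerge, hxu, hyu] using hR
      exact Relation.EqvGen.symm _ _ (Relation.EqvGen.trans _ _ _
        (hclass y hy0 hy c1 hcb1.1 hcb1.2 (hyu.trans hc1))
        (Relation.EqvGen.trans _ _ _ hcl12
          (Relation.EqvGen.symm _ _ (hclass x hx0 hx c2 hcb2.1 hcb2.2 (hxv.trans hc2)))))
    · have hxy : R x = R y := by simpa [pvMerge, hxu, hyu] using hR
      exact pvCl_append _ ((hP x y hx0 hx hy0 hy).1 hxy)
  · intro hcl
    rcases pvCl_resp hstep hcl with h | h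
    · exact h
    · rw [h]

lemma pvCard_merge {n : Int} {R : Int → Int} {u v : Int}
    (hu : u ∈ (Finset.Ico (0:Int) n).image R) (hv : v ∈ (Finset.Ico (0:Int) n).image R)
    (hne : u ≠ v) :
    (pvCard n (pvMerge R u v) : Int) = (pvCard n R : Int) - 1 := by
  have himg : (Finset.Ico (0:Int) n).image (pvMerge R u v)
      = ((Finset.Ico (0:Int) n).image R).erase u := by
    ext t
    simp only [Finset.mem_image, Finset.mem_erase, pvMerge]
    constructor
    · rintro ⟨x, hx, hxe⟩
      by_cases hxu : R x = u
      · simp only [hxu, if_true] at hxe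
        subst hxe
        exact ⟨Ne.symm hne, Finset.mem_image.1 hv⟩
      · simp only [hxu, if_false] at hxe
        subst hxe
        exact ⟨hxu, ⟨x, hx, rfl⟩⟩
    · rintro ⟨htu, x, hx, hxe⟩
      by_cases hxu : R x = u
      · exact absurd (hxe ▸ hxu) htu
      · exact ⟨x, hx, by rw [if_neg hxu]; exact hxe⟩
  have hpos : 0 < ((Finset.Ico (0:Int) n).image R).card := Finset.card_pos.2 ⟨u, hu⟩
  unfold pvCard
  rw [himg, Finset.card_erase_of_mem hu]
  omega

lemma pvCard_eq_of_iff {n : Int} {R R' : Int → Int}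
    (h : ∀ x y, 0 ≤ x → x < n → 0 ≤ y → y < n → (R x = R y ↔ R' x = R' y)) :
    pvCard n R = pvCard n R' := by
  have key : ∀ x1 x2, x1 ∈ Finset.Ico (0:Int) n → x2 ∈ Finset.Ico (0:Int) n →
      (R x1 = R x2 ↔ R' x1 = R' x2) := fun x1 x2 h1 h2 =>
    h _ _ (Finset.mem_Ico.1 h1).1 (Finset.mem_Ico.1 h1).2
      (Finset.mem_Ico.1 h2).1 (Finset.mem_Ico.1 h2).2
  unfold pvCard
  apply Finset.card_bij (fun a ha => R' (Finset.mem_image.1 ha).choose)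
  · intro a ha
    obtain ⟨hx, _⟩ := (Finset.mem_image.1 ha).choose_spec
    exact Finset.mem_image_of_mem _ hx
  · intro a1 h1 a2 h2 heq
    obtain ⟨hx1, he1⟩ := (Finset.mem_image.1 h1).choose_spec
    obtain ⟨hx2, he2⟩ := (Finset.mem_image.1 h2).choose_spec
    rw [← he1, ← he2]
    exact (key _ _ hx1 hx2).2 heq
  · intro b hb
    obtain ⟨y, hy, hye⟩ := Finset.mem_image.1 hb
    refine ⟨R y, Finset.mem_image_of_mem _ hy, ?_⟩
    obtain ⟨hx, hxe⟩ := (Finset.mem_image.1 (Finset.mem_image_of_mem R hy)).choose_spec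
    rw [(key _ _ hx hy).1 hxe, hye]

-- ---- union-find invariant (ghost root map R and termination measure d) ----
structure PvInv (n : Int) (parent : List Int) (R : Int → Int) (d : Int → Nat) : Prop where
  len : (parent.length : Int) = n
  rng : ∀ i, 0 ≤ i → i < n →
    0 ≤ PySem.List.pyGetD parent i 0 ∧ PySem.List.pyGetD parent i 0 < n
  compat : ∀ i, 0 ≤ i → i < n → R (PySem.List.pyGetD parent i 0) = R i
  rootR : ∀ i, 0 ≤ i → i < n →
    0 ≤ R i ∧ R i < n ∧ PySem.List.pyGetD parent (R i) 0 = R i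
  fixR : ∀ i, 0 ≤ i → i < n → PySem.List.pyGetD parent i 0 = i → R i = i
  wf : ∀ i, 0 ≤ i → i < n →
    PySem.List.pyGetD parent i 0 = i ∨ d (PySem.List.pyGetD parent i 0) < d i

noncomputable def pvMeas (n : Int) (d : Int → Nat) (p : Int) : Nat :=
  ((Finset.Ico (0:Int) n).filter (fun q => d q < d p)).card

lemma pvRootFix {n : Int} {parent : List Int} {R : Int → Int} {d : Int → Nat}
    (hI : PvInv n parent R d) {i : Int} (h0 : 0 ≤ i) (h : i < n) : R (R i) = R i := by
  obtain ⟨hr0, hr1, hr2⟩ := hI.rootR i h0 h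
  exact hI.fixR (R i) hr0 hr1 hr2

lemma pvFindLoop_ok {n : Int} {R : Int → Int} {d : Int → Nat} :
    ∀ (fuel : Nat) (parent : List Int) (p : Int), PvInv n parent R d →
    0 ≤ p → p < n → pvMeas n d p < fuel →
    ∃ parent', pvFindLoopA fuel parent p = (R p, parent') ∧ PvInv n parent' R d := by
  intro fuel
  induction fuel with
  | zero => intro parent p hI hp0 hp hm; omega
  | succ f ih =>
    intro parent p hI hp0 hp hm
    by_cases hroot : p = PySem.List.pyGetD parent p 0
    · refine ⟨parent, ?_, hI⟩
      rw [pvFindLoopA, if_pos hroot, hI.fixR p hp0 hp hroot.symm]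
    · set pp := PySem.List.pyGetD parent p 0 with hpp_def
      obtain ⟨hpp0, hppn⟩ := hI.rng p hp0 hp
      set g := PySem.List.pyGetD parent pp 0 with hg_def
      obtain ⟨hg0, hgn⟩ := hI.rng pp hpp0 hppn
      have hlenp : p < (parent.length : Int) := by rw [hI.len]; exact hp
      have hdpp : d pp < d p := by
        rcases hI.wf p hp0 hp with h' | h'
        · exact absurd h'.symm hroot
        · exact h'
      have hdg : d g < d p := by
        rcases hI.wf pp hpp0 hppn with h' | h'
        · rw [← hg_def] at h'; rw [h']; exact hdpp
        · exact lt_trans h' hdpp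
      set parent' := PySem.List.pySetD parent p g with hparent'_def
      have hlen' : parent'.length = parent.length := pv_len_set parent p g
      have hget' : ∀ j, 0 ≤ j → j < n →
          PySem.List.pyGetD parent' j 0 = if j = p then g else PySem.List.pyGetD parent j 0 := by
        intro j hj0 hj
        by_cases hjp : j = p
        · rw [if_pos hjp, hjp]; exact pv_getD_set_self parent p g hp0 hlenp
        · rw [if_neg hjp]
          exact pv_getD_set_ne parent p j g hp0 hj0 (by rw [hI.len]; exact hj) hjp
      have hInv' : PvInv n parent' R d := by
        refine ⟨by rw [hlen', hI.len], ?_, ?_, ?_, ?_, ?_⟩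
        · intro i hi0 hi
          rw [hget' i hi0 hi]
          by_cases hip : i = p
          · rw [if_pos hip]; exact ⟨hg0, hgn⟩
          · rw [if_neg hip]; exact hI.rng i hi0 hi
        · intro i hi0 hi
          rw [hget' i hi0 hi]
          by_cases hip : i = p
          · rw [if_pos hip, hip]
            rw [hg_def]
            rw [hI.compat pp hpp0 hppn, hpp_def, hI.compat p hp0 hp]
          · rw [if_neg hip]; exact hI.compat i hi0 hi
        · intro i hi0 hi
          obtain ⟨hr0, hr1, hr2⟩ := hI.rootR i hi0 hi
          refine ⟨hr0, hr1, ?_⟩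
          rw [hget' (R i) hr0 hr1]
          have : R i ≠ p := by
            intro hRp
            rw [hRp] at hr2
            exact hroot hr2.symm
          rw [if_neg this]; exact hr2
        · intro i hi0 hi hfix
          by_cases hip : i = p
          · exfalso
            rw [hget' i hi0 hi, if_pos hip] at hfix
            rw [hip] at hfix
            rw [hfix] at hdg
            exact absurd hdg (lt_irrefl _)
          · rw [hget' i hi0 hi, if_neg hip] at hfix
            exact hI.fixR i hi0 hi hfix
        · intro i hi0 hi
          rw [hget' i hi0 hi]
          by_cases hip : i = p
          · rw [if_pos hip, hip]
            right; exact hdg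
          · rw [if_neg hip]; exact hI.wf i hi0 hi
      have hgetp : PySem.List.pyGetD parent' p 0 = g := pv_getD_set_self parent p g hp0 hlenp
      have hmeas : pvMeas n d g < pvMeas n d p := by
        apply Finset.card_lt_card
        constructor
        · intro q hq
          simp only [Finset.mem_filter] at hq ⊢
          exact ⟨hq.1, lt_trans hq.2 hdg⟩
        · intro hsub
          have hgmem : g ∈ (Finset.Ico (0:Int) n).filter (fun q => d q < d p) := by
            simp only [Finset.mem_filter, Finset.mem_Ico]
            exact ⟨⟨hg0, hgn⟩, hdg⟩
          have := hsub hgmem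
          simp only [Finset.mem_filter] at this
          omega
      obtain ⟨parent'', heq, hI''⟩ := ih parent' g hInv' hg0 hgn
        (lt_of_lt_of_le hmeas (Nat.lt_succ_iff.1 hm))
      refine ⟨parent'', ?_, hI''⟩
      have hRg : R g = R p := by
        rw [hg_def, hI.compat pp hpp0 hppn, hpp_def, hI.compat p hp0 hp]
      rw [pvFindLoopA]
      rw [← hpp_def, ← hg_def, ← hparent'_def, if_neg hroot]
      show pvFindLoopA f parent' (PySem.List.pyGetD parent' p 0) = (R p, parent'')
      rw [hgetp, heq, hRg]

lemma pvFind_ok {n : Int} {parent : List Int} {R : Int → Int} {d : Int → Nat}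
    (hI : PvInv n parent R d) {v : Int} (h0 : 0 ≤ v) (h : v < n) :
    ∃ parent', pvFindA parent v = (R v, parent') ∧ PvInv n parent' R d := by
  set p0 := PySem.List.pyGetD parent v 0 with hp0_def
  obtain ⟨hp00, hp0n⟩ := hI.rng v h0 h
  have hcomp : R p0 = R v := hI.compat v h0 h
  have hlen : parent.length = n.toNat := by have := hI.len; omega
  have hmeas : pvMeas n d p0 < parent.length := by
    rw [hlen]
    have hsub : (Finset.Ico (0:Int) n).filter (fun q => d q < d p0) ⊂ Finset.Ico (0:Int) n := by
      constructor
      · exact Finset.filter_subset _ _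
      · intro hsub
        have : p0 ∈ (Finset.Ico (0:Int) n).filter (fun q => d q < d p0) :=
          hsub (by simp only [Finset.mem_Ico]; exact ⟨hp00, hp0n⟩)
        simp only [Finset.mem_filter] at this
        omega
    have := Finset.card_lt_card hsub
    rw [Int.card_Ico] at this
    unfold pvMeas
    omega
  obtain ⟨parent', heq, hI'⟩ := pvFindLoop_ok parent.length parent p0 hI hp00 hp0n hmeas
  refine ⟨parent', ?_, hI'⟩
  rw [pvFindA, ← hp0_def, heq, hcomp]

lemma pvLink_ok {n : Int} {parent : List Int} {R : Int → Int} {d : Int → Nat}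
    (hI : PvInv n parent R d) {u v : Int}
    (hu : 0 ≤ u ∧ u < n ∧ R u = u) (hv : 0 ≤ v ∧ v < n ∧ R v = v) (hne : u ≠ v) :
    ∃ d', PvInv n (PySem.List.pySetD parent u v) (pvMerge R u v) d' := by
  obtain ⟨hu0, hun, huR⟩ := hu
  obtain ⟨hv0, hvn, hvR⟩ := hv
  have hvu : v ≠ u := Ne.symm hne
  have hparfix : ∀ w, 0 ≤ w → w < n → R w = w → PySem.List.pyGetD parent w 0 = w := by
    intro w hw0 hwn hwR
    have := (hI.rootR w hw0 hwn).2.2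
    rw [hwR] at this
    exact this
  have hget' : ∀ j, 0 ≤ j → j < n →
      PySem.List.pyGetD (PySem.List.pySetD parent u v) j 0
        = if j = u then v else PySem.List.pyGetD parent j 0 := by
    intro j hj0 hj
    by_cases hju : j = u
    · rw [if_pos hju, hju]
      exact pv_getD_set_self parent u v hu0 (by rw [hI.len]; exact hun)
    · rw [if_neg hju]
      exact pv_getD_set_ne parent u j v hu0 hj0 (by rw [hI.len]; exact hj) hju
  refine ⟨fun i => if R i = u then d i + d v + 1 else d i, ?_, ?_, ?_, ?_, ?_, ?_⟩
  · rw [pv_len_set]; exact hI.len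
  · intro i hi0 hi
    rw [hget' i hi0 hi]
    by_cases hiu : i = u
    · rw [if_pos hiu]; exact ⟨hv0, hvn⟩
    · rw [if_neg hiu]; exact hI.rng i hi0 hi
  · intro i hi0 hi
    rw [hget' i hi0 hi]
    by_cases hiu : i = u
    · rw [if_pos hiu, hiu]
      simp [pvMerge, hvR, huR, hvu]
    · rw [if_neg hiu]
      have hc := hI.compat i hi0 hi
      simp only [pvMerge, hc]
  · intro i hi0 hi
    obtain ⟨hr0, hr1, hr2⟩ := hI.rootR i hi0 hi
    by_cases hiu : R i = u
    · simp only [pvMerge, if_pos hiu]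
      refine ⟨hv0, hvn, ?_⟩
      rw [hget' v hv0 hvn, if_neg hvu]
      exact hparfix v hv0 hvn hvR
    · simp only [pvMerge, if_neg hiu]
      refine ⟨hr0, hr1, ?_⟩
      rw [hget' (R i) hr0 hr1, if_neg hiu]
      exact hr2
  · intro i hi0 hi hfix
    rw [hget' i hi0 hi] at hfix
    by_cases hiu : i = u
    · rw [if_pos hiu] at hfix
      rw [hiu] at hfix
      exact absurd hfix hvu
    · rw [if_neg hiu] at hfix
      have hRi := hI.fixR i hi0 hi hfix
      simp only [pvMerge, hRi, if_neg hiu]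
  · intro i hi0 hi
    rw [hget' i hi0 hi]
    by_cases hiu : i = u
    · rw [if_pos hiu, hiu]
      right
      rw [if_neg (by rw [hvR]; exact hvu), if_pos (by rw [huR])]
      omega
    · rw [if_neg hiu]
      rcases hI.wf i hi0 hi with h' | h'
      · left; exact h'
      · right
        have hc := hI.compat i hi0 hi
        by_cases hRiu : R i = u
        · rw [if_pos (by rw [hc]; exact hRiu), if_pos hRiu]
          omega
        · rw [if_neg (by rw [hc]; exact hRiu), if_neg hRiu]
          exact h' 

lemma pvUnion_ok {n : Int} {parent : List Int} {R : Int → Int} {d : Int → Nat}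
    (hI : PvInv n parent R d) {a b : Int}
    (ha : 0 ≤ a ∧ a < n) (hb : 0 ≤ b ∧ b < n) (rank : List Int) :
    (R a = R b ∧ ∃ parent', pvUnionA parent rank a b = (0, parent', rank) ∧ PvInv n parent' R d)
    ∨ (R a ≠ R b ∧ ∃ parent' rank' u v d',
        pvUnionA parent rank a b = (1, parent', rank') ∧
        ((u = R a ∧ v = R b) ∨ (u = R b ∧ v = R a)) ∧ u ≠ v ∧
        PvInv n parent' (pvMerge R u v) d') := by
  obtain ⟨parent1, heq1, hI1⟩ := pvFind_ok hI ha.1 ha.2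
  obtain ⟨parent2, heq2, hI2⟩ := pvFind_ok hI1 hb.1 hb.2
  have hun : pvUnionA parent rank a b =
      (if R a = R b then ((0:Int), parent2, rank)
       else if PySem.List.pyGetD rank (R a) 0 > PySem.List.pyGetD rank (R b) 0 then
         ((1:Int), PySem.List.pySetD parent2 (R b) (R a),
          PySem.List.pySetD rank (R a)
            (PySem.List.pyGetD rank (R a) 0 + PySem.List.pyGetD rank (R b) 0))
       else
         ((1:Int), PySem.List.pySetD parent2 (R a) (R b),
          PySem.List.pySetD rank (R b)
            (PySem.List.pyGetD rank (R b) 0 + PySem.List.pyGetD rank (R a) 0))) := by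
    unfold pvUnionA
    simp only [heq1]
    simp only [heq2]
  have hRa := hI.rootR a ha.1 ha.2
  have hRb := hI.rootR b hb.1 hb.2
  have hRaF : R (R a) = R a := pvRootFix hI ha.1 ha.2
  have hRbF : R (R b) = R b := pvRootFix hI hb.1 hb.2
  by_cases hab : R a = R b
  · left
    refine ⟨hab, parent2, ?_, hI2⟩
    rw [hun, if_pos hab]
  · right
    refine ⟨hab, ?_⟩
    by_cases hrk : PySem.List.pyGetD rank (R a) 0 > PySem.List.pyGetD rank (R b) 0
    · obtain ⟨d', hI'⟩ := pvLink_ok hI2 (u := R b) (v := R a)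
        ⟨hRb.1, hRb.2.1, hRbF⟩ ⟨hRa.1, hRa.2.1, hRaF⟩ (Ne.symm hab)
      exact ⟨_, _, R b, R a, d', by rw [hun, if_neg hab, if_pos hrk],
        Or.inr ⟨rfl, rfl⟩, Ne.symm hab, hI'⟩
    · obtain ⟨d', hI'⟩ := pvLink_ok hI2 (u := R a) (v := R b)
        ⟨hRa.1, hRa.2.1, hRaF⟩ ⟨hRb.1, hRb.2.1, hRbF⟩ hab
      exact ⟨_, _, R a, R b, d', by rw [hun, if_neg hab, if_neg hrk],
        Or.inl ⟨rfl, rfl⟩, hab, hI'⟩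

-- ---- the two edge-processing folds ----
def pvStepUF (st : List Int × List Int × Int) (e : Int × Int) : List Int × List Int × Int :=
  let u := pvUnionA st.1 st.2.1 e.1 e.2
  (u.2.1, u.2.2, st.2.2 - u.1)

def pvRep (label : List Int) : Int → Int := fun i => PySem.List.pyGetD label i 0

def pvLInv (n : Int) (label : List Int) : Prop :=
  (label.length : Int) = n ∧ ∀ i, 0 ≤ i → i < n → 0 ≤ pvRep label i ∧ pvRep label i < n

lemma pvFoldA {n : Int} (edges : List (Int × Int)) :
    ∀ (E0 : List (Int × Int)) (parent rank : List Int) (cc : Int) (R : Int → Int) (d : Int → Nat),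
    pvEOK n edges → PvInv n parent R d → pvPartEq n R E0 → pvEOK n E0 →
    cc = (pvCard n R : Int) →
    ∃ R' d', PvInv n (edges.foldl pvStepUF (parent, rank, cc)).1 R' d' ∧
      pvPartEq n R' (E0 ++ edges) ∧
      (edges.foldl pvStepUF (parent, rank, cc)).2.2 = (pvCard n R' : Int) := by
  induction edges with
  | nil =>
    intro E0 parent rank cc R d hE hI hP hE0 hcc
    exact ⟨R, d, hI, by simpa using hP, hcc⟩
  | cons e rest ih =>
    rcases e with ⟨a, b⟩
    intro E0 parent rank cc R d hE hI hP hE0 hcc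
    have hab := hE (a, b) (by simp)
    simp only at hab
    have hrest : pvEOK n rest := fun e he => hE e (by simp [he])
    have hE0' : pvEOK n (E0 ++ [(a, b)]) := by
      intro e he
      rcases List.mem_append.1 he with h | h
      · exact hE0 e h
      · simp at h; rw [h]; exact hab
    rcases pvUnion_ok hI ⟨hab.1, hab.2.1⟩ ⟨hab.2.2.1, hab.2.2.2⟩ rank with
      ⟨hRab, parent', hueq, hI'⟩ | ⟨hRab, parent', rank', u, v, d', hueq, huv, huvne, hI'⟩
    · have hstep : pvStepUF (parent, rank, cc) (a, b) = (parent', rank, cc) := by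
        simp only [pvStepUF, hueq]
        simp
      rw [List.foldl_cons, hstep]
      obtain ⟨R', d'', hI'', hP'', hcc''⟩ := ih (E0 ++ [(a, b)]) parent' rank cc R d hrest hI'
        (pvPartEq_same hE0 hP ⟨hab.1, hab.2.1⟩ ⟨hab.2.2.1, hab.2.2.2⟩ hRab) hE0' hcc
      exact ⟨R', d'', hI'', by simpa [List.append_assoc] using hP'', hcc''⟩
    · have hstep : pvStepUF (parent, rank, cc) (a, b) = (parent', rank', cc - 1) := by
        simp only [pvStepUF, hueq]
      rw [List.foldl_cons, hstep]
      have humem : u ∈ (Finset.Ico (0:Int) n).image R := by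
        rcases huv with ⟨h1, _⟩ | ⟨h1, _⟩
        · exact Finset.mem_image.2 ⟨a, Finset.mem_Ico.2 ⟨hab.1, hab.2.1⟩, h1.symm⟩
        · exact Finset.mem_image.2 ⟨b, Finset.mem_Ico.2 ⟨hab.2.2.1, hab.2.2.2⟩, h1.symm⟩
      have hvmem : v ∈ (Finset.Ico (0:Int) n).image R := by
        rcases huv with ⟨_, h2⟩ | ⟨_, h2⟩
        · exact Finset.mem_image.2 ⟨b, Finset.mem_Ico.2 ⟨hab.2.2.1, hab.2.2.2⟩, h2.symm⟩
        · exact Finset.mem_image.2 ⟨a, Finset.mem_Ico.2 ⟨hab.1, hab.2.1⟩, h2.symm⟩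
      have hccm : cc - 1 = (pvCard n (pvMerge R u v) : Int) := by
        rw [pvCard_merge humem hvmem huvne, hcc]
      obtain ⟨R', d'', hI'', hP'', hcc''⟩ := ih (E0 ++ [(a, b)]) parent' rank' (cc - 1)
        (pvMerge R u v) d' hrest hI'
        (pvPartEq_merge hE0 hP ⟨hab.1, hab.2.1⟩ ⟨hab.2.2.1, hab.2.2.2⟩ huv huvne) hE0' hccm
      exact ⟨R', d'', hI'', by simpa [List.append_assoc] using hP'', hcc''⟩

def pvStepB (st : List Int × Int) (e : Int × Int) : List Int × Int :=
  let la := PySem.List.pyGetD st.1 e.1 0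
  let lb := PySem.List.pyGetD st.1 e.2 0
  if la ≠ lb then (st.1.map (fun l => if l = lb then la else l), st.2 + 1) else st

lemma pvFoldB {n : Int} (edges : List (Int × Int)) :
    ∀ (E0 : List (Int × Int)) (label : List Int) (swaps : Int),
    pvEOK n edges → pvLInv n label → pvPartEq n (pvRep label) E0 → pvEOK n E0 →
    swaps = n - (pvCard n (pvRep label) : Int) →
    pvLInv n (edges.foldl pvStepB (label, swaps)).1 ∧
    pvPartEq n (pvRep (edges.foldl pvStepB (label, swaps)).1) (E0 ++ edges) ∧
    (edges.foldl pvStepB (label, swaps)).2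
      = n - (pvCard n (pvRep (edges.foldl pvStepB (label, swaps)).1) : Int) := by
  induction edges with
  | nil =>
    intro E0 label swaps hE hL hP hE0 hsw
    exact ⟨hL, by simpa using hP, hsw⟩
  | cons e rest ih =>
    rcases e with ⟨a, b⟩
    intro E0 label swaps hE hL hP hE0 hsw
    have hab := hE (a, b) (by simp)
    simp only at hab
    have hrest : pvEOK n rest := fun e he => hE e (by simp [he])
    have hE0' : pvEOK n (E0 ++ [(a, b)]) := by
      intro e he
      rcases List.mem_append.1 he with h | h
      · exact hE0 e h
      · simp at h; rw [h]; exact hab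
    have hla : PySem.List.pyGetD label a 0 = pvRep label a := rfl
    have hlb : PySem.List.pyGetD label b 0 = pvRep label b := rfl
    by_cases hll : pvRep label a = pvRep label b
    · have hstep : pvStepB (label, swaps) (a, b) = (label, swaps) := by
        simp only [pvStepB, hla, hlb]
        rw [if_neg (by simp [hll])]
      rw [List.foldl_cons, hstep]
      obtain ⟨hL', hP', hsw'⟩ := ih (E0 ++ [(a, b)]) label swaps hrest hL
        (pvPartEq_same hE0 hP ⟨hab.1, hab.2.1⟩ ⟨hab.2.2.1, hab.2.2.2⟩ hll) hE0' hsw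
      exact ⟨hL', by simpa [List.append_assoc] using hP', hsw'⟩
    · set la := pvRep label a with hla_def
      set lb := pvRep label b with hlb_def
      set label' := label.map (fun l => if l = lb then la else l) with hlabel'_def
      have hstep : pvStepB (label, swaps) (a, b) = (label', swaps + 1) := by
        simp only [pvStepB, hla, hlb]
        rw [if_pos (by simp [hll])]
      rw [List.foldl_cons, hstep]
      have hlen : (label.length : Int) = n := hL.1
      have hrep' : ∀ i, 0 ≤ i → i < n → pvRep label' i = pvMerge (pvRep label) lb la i := by
        intro i hi0 hi
        have hilen : i < (label.length : Int) := by omega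
        have hilen' : i < (label'.length : Int) := by
          rw [hlabel'_def, List.length_map]; omega
        simp only [pvRep, pvMerge]
        rw [pv_getD_eq _ _ hi0 hilen', pv_getD_eq _ _ hi0 hilen]
        simp only [hlabel'_def, List.getElem_map]
      have hL' : pvLInv n label' := by
        refine ⟨by rw [hlabel'_def, List.length_map]; exact hlen, ?_⟩
        intro i hi0 hi
        rw [hrep' i hi0 hi]
        simp only [pvMerge]
        by_cases hc : pvRep label i = lb
        · rw [if_pos hc, hla_def]
          exact hL.2 a hab.1 hab.2.1
        · rw [if_neg hc]
          exact hL.2 i hi0 hi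
      have hmerge : pvPartEq n (pvMerge (pvRep label) lb la) (E0 ++ [(a, b)]) :=
        pvPartEq_merge hE0 hP ⟨hab.1, hab.2.1⟩ ⟨hab.2.2.1, hab.2.2.2⟩
          (Or.inr ⟨hlb_def, hla_def⟩) (fun h => hll h.symm)
      have hP' : pvPartEq n (pvRep label') (E0 ++ [(a, b)]) :=
        pvPartEq_congr (fun x hx0 hx => (hrep' x hx0 hx).symm) hmerge
      have hcard : (pvCard n (pvRep label') : Int) = (pvCard n (pvRep label) : Int) - 1 := by
        rw [pvCard_congr (R := pvRep label') (R' := pvMerge (pvRep label) lb la)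
          (fun x hx0 hx => hrep' x hx0 hx)]
        exact pvCard_merge
          (Finset.mem_image.2 ⟨b, Finset.mem_Ico.2 ⟨hab.2.2.1, hab.2.2.2⟩, hlb_def.symm⟩)
          (Finset.mem_image.2 ⟨a, Finset.mem_Ico.2 ⟨hab.1, hab.2.1⟩, hla_def.symm⟩)
          (fun h => hll h.symm)
      obtain ⟨hL'', hP'', hsw''⟩ := ih (E0 ++ [(a, b)]) label' (swaps + 1) hrest hL' hP' hE0'
        (by omega)
      exact ⟨hL'', by simpa [List.append_assoc] using hP'', hsw''⟩

lemma pvCl_iff_of_step_iff {E E' : List (Int × Int)}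
    (h : ∀ x y, pvStep E x y ↔ pvStep E' x y) (x y : Int) :
    pvCl E x y ↔ pvCl E' x y :=
  ⟨pvCl_mono (fun x y => (h x y).1), pvCl_mono (fun x y => (h x y).2)⟩

-- ---- characterization of A's couple/graph-building loops ----
lemma pvBuild1 (N : Nat) :
    ∃ g0 c0, (PySem.List.pyRange 0 (N : Int) 1).foldl
      (fun (st : PySem.Dict Int (PySem.Set Int) × PySem.Dict Int Int × Int) i =>
        ((st.1.insert st.2.2 PySem.Set.empty),
         ((st.2.1.insert (2 * i) st.2.2).insert (2 * i + 1) st.2.2),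
         st.2.2 + 1))
      (PySem.Dict.empty, PySem.Dict.empty, 0) = (g0, c0, (N : Int)) ∧
    (∀ x : Int, 0 ≤ x → x < 2 * (N : Int) → c0.getD x 0 = PySem.Int.floordiv x 2) ∧
    g0.keys = PySem.List.pyRange 0 (N : Int) 1 ∧
    (∀ k, g0.getD k PySem.Set.empty = PySem.Set.empty) ∧
    g0.size = N := by
  induction N with
  | zero =>
    refine ⟨PySem.Dict.empty, PySem.Dict.empty, ?_, ?_, ?_, ?_, ?_⟩
    · simp [PySem.List.pyRange_one_eq_nil]
    · intro x h0 h2; omega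
    · simp [PySem.List.pyRange_one_eq_nil, PySem.Dict.keys_empty]
    · intro k; exact PySem.Dict.getD_empty k _
    · exact PySem.Dict.size_empty
  | succ N ihN =>
    obtain ⟨g0, c0, hfold, hc0, hkeys, hgetD, hsize⟩ := ihN
    have hcast : ((N + 1 : Nat) : Int) = (N : Int) + 1 := by push_cast; ring
    have hsplit : PySem.List.pyRange 0 ((N + 1 : Nat) : Int) 1
        = PySem.List.pyRange 0 (N : Int) 1 ++ [(N : Int)] := by
      rw [hcast, PySem.List.pyRange_one_succ_right (by positivity)]
    have hNotMem : ((N : Int) ∈ PySem.List.pyRange 0 (N : Int) 1) = False := by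
      simp [PySem.List.mem_pyRange_one]
    have hnc : g0.contains (N : Int) = false := by
      rw [PySem.Dict.contains_eq_decide_mem_keys, hkeys]
      simp [hNotMem]
    refine ⟨g0.insert (N : Int) PySem.Set.empty,
      (c0.insert (2 * (N : Int)) (N : Int)).insert (2 * (N : Int) + 1) (N : Int), ?_, ?_, ?_, ?_, ?_⟩
    · rw [hsplit, List.foldl_append, hfold, List.foldl_cons, List.foldl_nil, hcast]
    · intro x h0 h2
      rw [PySem.Dict.getD_insert, PySem.Dict.getD_insert]
      by_cases h1 : x = 2 * (N : Int) + 1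
      · rw [if_pos h1, h1]
        rw [PySem.Int.floordiv_eq_ediv_of_pos (by norm_num)]
        omega
      · rw [if_neg h1]
        by_cases h2' : x = 2 * (N : Int)
        · rw [if_pos h2', h2']
          rw [PySem.Int.floordiv_eq_ediv_of_pos (by norm_num)]
          omega
        · rw [if_neg h2']
          refine hc0 x h0 (by push_cast at h2; omega)
    · rw [PySem.Dict.keys_insert_of_not_contains _ _ hnc, hkeys, hcast,
        PySem.List.pyRange_one_succ_right (by positivity)]
    · intro k
      rw [PySem.Dict.getD_insert]
      by_cases hk : k = (N : Int)
      · rw [if_pos hk]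
      · rw [if_neg hk]; exact hgetD k
    · rw [PySem.Dict.size_insert, hnc]
      simp [hsize]

lemma pvBuild2 (ca cb : Int → Int) (l : List Int) :
    ∀ g : PySem.Dict Int (PySem.Set Int),
    (∀ p ∈ l, g.contains (ca p) = true ∧ g.contains (cb p) = true) →
    ((l.foldl (fun g p =>
        (g.modify (ca p) PySem.Set.empty (fun s => s.add (cb p))).modify (cb p)
          PySem.Set.empty (fun s => s.add (ca p))) g).keys = g.keys) ∧
    (∀ src dst, dst ∈ (l.foldl (fun g p =>
        (g.modify (ca p) PySem.Set.empty (fun s => s.add (cb p))).modify (cb p)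
          PySem.Set.empty (fun s => s.add (ca p))) g).getD src PySem.Set.empty ↔
      dst ∈ g.getD src PySem.Set.empty ∨
        ∃ p ∈ l, (ca p = src ∧ cb p = dst) ∨ (cb p = src ∧ ca p = dst)) := by
  induction l with
  | nil => intro g _; simp
  | cons p rest ih =>
    intro g hcont
    have hp := hcont p (by simp)
    set g2 := (g.modify (ca p) PySem.Set.empty (fun s => s.add (cb p))).modify (cb p)
      PySem.Set.empty (fun s => s.add (ca p)) with hg2_def
    have hcont2 : ∀ q ∈ rest, g2.contains (ca q) = true ∧ g2.contains (cb q) = true := by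
      intro q hq
      have := hcont q (by simp [hq])
      rw [hg2_def]
      constructor <;> rw [PySem.Dict.contains_modify, PySem.Dict.contains_modify] <;>
        simp [this.1, this.2]
    have hkeys2 : g2.keys = g.keys := by
      rw [hg2_def, PySem.Dict.keys_modify,
        PySem.Dict.keys_insert_of_contains _ _ (by
          rw [PySem.Dict.contains_modify]; simp [hp.2]),
        PySem.Dict.keys_modify, PySem.Dict.keys_insert_of_contains _ _ hp.1]
    have hget2 : ∀ src, g2.getD src PySem.Set.empty
        = if src = cb p then
            ((if cb p = ca p then (g.getD (ca p) PySem.Set.empty).add (cb p)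
              else g.getD (cb p) PySem.Set.empty).add (ca p))
          else if src = ca p then (g.getD (ca p) PySem.Set.empty).add (cb p)
          else g.getD src PySem.Set.empty := by
      intro src
      rw [hg2_def]
      simp only [PySem.Dict.getD_modify]
    obtain ⟨ihk, ihm⟩ := ih g2 hcont2
    refine ⟨?_, ?_⟩
    · rw [List.foldl_cons, ← hg2_def, ihk, hkeys2]
    · intro src dst
      rw [List.foldl_cons, ← hg2_def, ihm src dst, hget2 src]
      constructor
      · rintro (h | ⟨q, hq, hcase⟩)
        · split_ifs at h with h1 h2 h3
          · rcases (PySem.Set.mem_add _ _ _).1 h with h' | h'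
            · rcases (PySem.Set.mem_add _ _ _).1 h' with h'' | h''
              · left; rw [h1, h2]; exact h''
              · right; exact ⟨p, by simp, Or.inl ⟨h2.symm.trans h1.symm, h''.symm⟩⟩
            · right; exact ⟨p, by simp, Or.inr ⟨h1.symm, h'.symm⟩⟩
          · rcases (PySem.Set.mem_add _ _ _).1 h with h' | h'
            · left; rw [h1]; exact h'
            · right; exact ⟨p, by simp, Or.inr ⟨h1.symm, h'.symm⟩⟩
          · rcases (PySem.Set.mem_add _ _ _).1 h with h' | h'
            · left; rw [h3]; exact h'
            · right; exact ⟨p, by simp, Or.inl ⟨h3.symm, h'.symm⟩⟩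
          · left; exact h
        · right; exact ⟨q, by simp [hq], hcase⟩
      · rintro (h | ⟨q, hq, hcase⟩)
        · left
          split_ifs with h1 h2 h3
          · exact (PySem.Set.mem_add _ _ _).2 (Or.inl ((PySem.Set.mem_add _ _ _).2
              (Or.inl (by rw [← h2, ← h1]; exact h))))
          · exact (PySem.Set.mem_add _ _ _).2 (Or.inl (by rw [← h1]; exact h))
          · exact (PySem.Set.mem_add _ _ _).2 (Or.inl (by rw [← h3]; exact h))
          · exact h
        · rcases List.mem_cons.1 hq with hq' | hq'
          · subst hq'
            left
            rcases hcase with ⟨hs, hd⟩ | ⟨hs, hd⟩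
            · split_ifs with h1 h2 h3
              · exact (PySem.Set.mem_add _ _ _).2 (Or.inl ((PySem.Set.mem_add _ _ _).2
                  (Or.inr hd.symm)))
              · exact absurd (hs.trans h1).symm h2
              · exact (PySem.Set.mem_add _ _ _).2 (Or.inr hd.symm)
              · exact absurd hs.symm h3
            · split_ifs with h1 h2 h3
              · exact (PySem.Set.mem_add _ _ _).2 (Or.inr hd.symm)
              · exact (PySem.Set.mem_add _ _ _).2 (Or.inr hd.symm)
              · exact absurd hs (fun hh => h1 hh.symm)
              · exact absurd hs (fun hh => h1 hh.symm)
          · exact Or.inr ⟨q, by simp [hq'], hcase⟩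

-- ===== VERDICT (by name: the statement is the Claim_ definition above) =====
theorem minSwapsCouples_spec : Claim_equal_minSwapsCouples := by
  unfold Claim_equal_minSwapsCouples
  intro row _hdom hpre
  unfold Spec_minSwapsCouples
  have hn : PySem.Int.floordiv (PySem.List.len row) 2 = ((row.length / 2 : Nat) : Int) := by
    rw [PySem.List.len_eq]
    exact_mod_cast PySem.Int.floordiv_natCast row.length 2
  obtain ⟨g0, c0, hfold1, hc0, hkeys0, hgetD0, hsize0⟩ := pvBuild1 (row.length / 2)
  -- elementwise form of Pre_
  have hrow : ∀ (k : Nat) (hk : k < 2 * (row.length / 2)),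
      0 ≤ row[k]'(by omega) ∧ row[k]'(by omega) < ((2 * (row.length / 2) : Nat) : Int) := by
    intro k hk
    have hk' : k < (List.take (2 * (row.length / 2)) row).length := by
      simp [List.length_take]; omega
    have hmem : row[k]'(by omega) ∈ row.take (2 * (row.length / 2)) := by
      rw [← List.getElem_take (h := hk')]
      exact List.getElem_mem hk'
    exact hpre _ hmem
  simp only [minSwapsCouples, minSwapsCouples_alt, hn, hfold1]
  set N : Nat := row.length / 2 with hN_def
  set n : Int := (N : Int) with hn_def
  have h2N : 2 * N ≤ row.length := by rw [hN_def]; omega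
  -- bounds for the seated values
  have hval : ∀ j : Int, 0 ≤ j → j < 2 * n →
      0 ≤ PySem.List.pyGetD row j 0 ∧ PySem.List.pyGetD row j 0 < 2 * n := by
    intro j hj0 hj
    rw [hn_def] at hj
    have hjlen : j < (row.length : Int) := by omega
    rw [pv_getD_eq row j hj0 hjlen]
    obtain ⟨hr1, hr2⟩ := hrow j.toNat (by omega)
    refine ⟨hr1, ?_⟩
    rw [hn_def]
    push_cast at hr2 ⊢
    omega
  have hhalf : ∀ x : Int, 0 ≤ x → x < 2 * n →
      0 ≤ PySem.Int.floordiv x 2 ∧ PySem.Int.floordiv x 2 < n := by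
    intro x h0 h2
    rw [PySem.Int.floordiv_eq_ediv_of_pos (by norm_num)]
    omega
  -- the two couple-index functions agree and are bounded
  set fa : Int → Int := fun p => PySem.Int.floordiv (PySem.List.pyGetD row (2 * p) 0) 2
    with hfa_def
  set fb : Int → Int := fun p => PySem.Int.floordiv (PySem.List.pyGetD row (2 * p + 1) 0) 2
    with hfb_def
  have hfa_bnd : ∀ p, 0 ≤ p → p < n → 0 ≤ fa p ∧ fa p < n := by
    intro p h0 h1
    exact hhalf _ (hval (2 * p) (by omega) (by omega)).1 (hval (2 * p) (by omega) (by omega)).2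
  have hfb_bnd : ∀ p, 0 ≤ p → p < n → 0 ≤ fb p ∧ fb p < n := by
    intro p h0 h1
    exact hhalf _ (hval (2 * p + 1) (by omega) (by omega)).1
      (hval (2 * p + 1) (by omega) (by omega)).2
  have hcaA : ∀ p, 0 ≤ p → p < n →
      c0.getD (PySem.List.pyGetD row (2 * p) 0) 0 = fa p := by
    intro p h0 h1
    rw [hfa_def]
    exact hc0 _ (hval (2 * p) (by omega) (by omega)).1 (hval (2 * p) (by omega) (by omega)).2
  have hcbA : ∀ p, 0 ≤ p → p < n →
      c0.getD (PySem.List.pyGetD row (2 * p + 1) 0) 0 = fb p := by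
    intro p h0 h1
    rw [hfb_def]
    exact hc0 _ (hval (2 * p + 1) (by omega) (by omega)).1
      (hval (2 * p + 1) (by omega) (by omega)).2
  -- the built graph
  set G := List.foldl
      (fun g p =>
        (g.modify (c0.getD (PySem.List.pyGetD row (2 * p) 0) 0) PySem.Set.empty fun s =>
              s.add (c0.getD (PySem.List.pyGetD row (2 * p + 1) 0) 0)).modify
          (c0.getD (PySem.List.pyGetD row (2 * p + 1) 0) 0) PySem.Set.empty fun s =>
          s.add (c0.getD (PySem.List.pyGetD row (2 * p) 0) 0))
      g0 (PySem.List.pyRange 0 n 1) with hG_def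
  obtain ⟨hGkeys, hGmem⟩ := pvBuild2
    (fun p => c0.getD (PySem.List.pyGetD row (2 * p) 0) 0)
    (fun p => c0.getD (PySem.List.pyGetD row (2 * p + 1) 0) 0)
    (PySem.List.pyRange 0 n 1) g0 (by
      intro p hp
      rw [PySem.List.mem_pyRange_one] at hp
      simp only [PySem.Dict.contains_eq_decide_mem_keys, hkeys0, decide_eq_true_eq,
        PySem.List.mem_pyRange_one]
      rw [hcaA p hp.1 hp.2, hcbA p hp.1 hp.2]
      exact ⟨hfa_bnd p hp.1 hp.2, hfb_bnd p hp.1 hp.2⟩)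
  rw [← hG_def] at hGkeys hGmem
  rw [hkeys0] at hGkeys
  have hGsize : G.size = N := by
    have h1 : G.size = G.keys.length := by simp [PySem.Dict.size, PySem.Dict.keys]
    rw [h1, hGkeys, PySem.List.length_pyRange_one]
    omega
  have hGmem' : ∀ src dst, dst ∈ G.getD src PySem.Set.empty ↔
      ∃ p, (0 ≤ p ∧ p < n) ∧ ((fa p = src ∧ fb p = dst) ∨ (fb p = src ∧ fa p = dst)) := by
    intro src dst
    rw [hGmem src dst, hgetD0 src]
    constructor
    · rintro (h | ⟨p, hp, hcase⟩)
      · simp [PySem.Set.empty] at h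
      · rw [PySem.List.mem_pyRange_one] at hp
        rw [hcaA p hp.1 hp.2, hcbA p hp.1 hp.2] at hcase
        exact ⟨p, hp, hcase⟩
    · rintro ⟨p, hp, hcase⟩
      right
      refine ⟨p, PySem.List.mem_pyRange_one.2 hp, ?_⟩
      rw [hcaA p hp.1 hp.2, hcbA p hp.1 hp.2]
      exact hcase
  rw [hGsize, ← hn_def]
  -- the union-find loop as a fold over an edge list
  set EA := G.keys.flatMap
    (fun src => (G.getD src PySem.Set.empty).map (fun dst => (src, dst))) with hEA_def
  have hnest : List.foldl
      (fun (st : List Int × List Int × Int) src =>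
        List.foldl
          (fun (st : List Int × List Int × Int) dst =>
            ((pvUnionA st.1 st.2.1 src dst).2.1, (pvUnionA st.1 st.2.1 src dst).2.2,
              st.2.2 - (pvUnionA st.1 st.2.1 src dst).1))
          st (G.getD src PySem.Set.empty))
      (PySem.List.pyRange 0 n 1, PySem.List.pyRepeat [1] n, n) G.keys
      = EA.foldl pvStepUF
        (PySem.List.pyRange 0 n 1, PySem.List.pyRepeat [1] n, n) := by
    rw [hEA_def, List.foldl_flatMap]
    simp only [List.foldl_map]
    rfl
  rw [hnest]
  -- B's loop as a fold over its edge list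
  set EB := (PySem.List.pyRange 0 n 1).map (fun p => (fa p, fb p)) with hEB_def
  have hBfold : List.foldl
      (fun (st : List Int × Int) p =>
        if PySem.List.pyGetD st.1 (PySem.Int.floordiv (PySem.List.pyGetD row (2 * p) 0) 2) 0 ≠
            PySem.List.pyGetD st.1 (PySem.Int.floordiv (PySem.List.pyGetD row (2 * p + 1) 0) 2) 0
        then (st.1.map (fun l =>
            if l = PySem.List.pyGetD st.1
                (PySem.Int.floordiv (PySem.List.pyGetD row (2 * p + 1) 0) 2) 0
            then PySem.List.pyGetD st.1
                (PySem.Int.floordiv (PySem.List.pyGetD row (2 * p) 0) 2) 0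
            else l), st.2 + 1)
        else st)
      (PySem.List.pyRange 0 n 1, 0) (PySem.List.pyRange 0 n 1)
      = EB.foldl pvStepB (PySem.List.pyRange 0 n 1, 0) := by
    rw [hEB_def, List.foldl_map]
    rfl
  rw [hBfold]
  -- membership characterizations of the two edge lists
  have hEAmem : ∀ x y : Int, (x, y) ∈ EA ↔ (0 ≤ x ∧ x < n) ∧
      ∃ p, (0 ≤ p ∧ p < n) ∧ ((fa p = x ∧ fb p = y) ∨ (fb p = x ∧ fa p = y)) := by
    intro x y
    rw [hEA_def]
    simp only [List.mem_flatMap, List.mem_map]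
    constructor
    · rintro ⟨src, hsrc, dst, hdst, heq⟩
      obtain ⟨h1, h2⟩ := Prod.mk.inj heq
      subst h1
      subst h2
      rw [hGkeys, PySem.List.mem_pyRange_one] at hsrc
      exact ⟨hsrc, (hGmem' _ _).1 hdst⟩
    · rintro ⟨hx, p, hp, hcase⟩
      refine ⟨x, ?_, y, (hGmem' x y).2 ⟨p, hp, hcase⟩, rfl⟩
      rw [hGkeys, PySem.List.mem_pyRange_one]
      exact hx
  have hEBmem : ∀ x y : Int, (x, y) ∈ EB ↔
      ∃ p, (0 ≤ p ∧ p < n) ∧ fa p = x ∧ fb p = y := by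
    intro x y
    rw [hEB_def]
    simp only [List.mem_map, PySem.List.mem_pyRange_one, Prod.mk.injEq]
  have hstepiff : ∀ x y, pvStep EA x y ↔ pvStep EB x y := by
    intro x y
    unfold pvStep
    rw [hEAmem, hEAmem, hEBmem, hEBmem]
    constructor
    · rintro (⟨hx, p, hp, ⟨h1, h2⟩ | ⟨h1, h2⟩⟩ | ⟨hy, p, hp, ⟨h1, h2⟩ | ⟨h1, h2⟩⟩)
      · exact Or.inl ⟨p, hp, h1, h2⟩
      · exact Or.inr ⟨p, hp, h2, h1⟩
      · exact Or.inr ⟨p, hp, h1, h2⟩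
      · exact Or.inl ⟨p, hp, h2, h1⟩
    · rintro (⟨p, hp, h1, h2⟩ | ⟨p, hp, h1, h2⟩)
      · exact Or.inl ⟨by rw [← h1]; exact hfa_bnd p hp.1 hp.2, p, hp, Or.inl ⟨h1, h2⟩⟩
      · exact Or.inr ⟨by rw [← h1]; exact hfa_bnd p hp.1 hp.2, p, hp, Or.inl ⟨h1, h2⟩⟩
  have hEAok : pvEOK n EA := by
    rintro ⟨x, y⟩ hmem
    obtain ⟨hx, p, hp, hcase⟩ := (hEAmem x y).1 hmem
    rcases hcase with ⟨h1, h2⟩ | ⟨h1, h2⟩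
    · exact ⟨hx.1, hx.2, by rw [← h2]; exact (hfb_bnd p hp.1 hp.2).1,
        by rw [← h2]; exact (hfb_bnd p hp.1 hp.2).2⟩
    · exact ⟨hx.1, hx.2, by rw [← h2]; exact (hfa_bnd p hp.1 hp.2).1,
        by rw [← h2]; exact (hfa_bnd p hp.1 hp.2).2⟩
  have hEBok : pvEOK n EB := by
    rintro ⟨x, y⟩ hmem
    obtain ⟨p, hp, h1, h2⟩ := (hEBmem x y).1 hmem
    rw [← h1, ← h2]
    exact ⟨(hfa_bnd p hp.1 hp.2).1, (hfa_bnd p hp.1 hp.2).2,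
      (hfb_bnd p hp.1 hp.2).1, (hfb_bnd p hp.1 hp.2).2⟩
  -- initial states
  have hid_range : ∀ i : Int, 0 ≤ i → i < n →
      PySem.List.pyGetD (PySem.List.pyRange 0 n 1) i 0 = i := fun i h0 h1 =>
    pv_getD_pyRange n i h0 h1
  have hlen_range : ((PySem.List.pyRange 0 n 1).length : Int) = n := by
    rw [PySem.List.length_pyRange_one]
    omega
  have hInit : PvInv n (PySem.List.pyRange 0 n 1) (fun i => i) (fun _ => 0) := by
    refine ⟨hlen_range, ?_, ?_, ?_, ?_, ?_⟩
    · intro i h0 h1; rw [hid_range i h0 h1]; exact ⟨h0, h1⟩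
    · intro i h0 h1; rw [hid_range i h0 h1]
    · intro i h0 h1; exact ⟨h0, h1, hid_range i h0 h1⟩
    · intro i _ _ _; rfl
    · intro i h0 h1; left; exact hid_range i h0 h1
  have hCardId : n = (pvCard n (fun i => i) : Int) := by
    unfold pvCard
    rw [show (Finset.Ico (0:Int) n).image (fun i => i) = Finset.Ico (0:Int) n from
      Finset.image_id]
    rw [Int.card_Ico]
    omega
  have hPartNil : pvPartEq n (fun i : Int => i) [] :=
    pvPartEq_nil n _ (fun x _ _ => rfl)
  obtain ⟨RA, dA, hIA, hPA, hccA⟩ := pvFoldA (n := n) EA []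
    (PySem.List.pyRange 0 n 1) (PySem.List.pyRepeat [1] n) n (fun i => i) (fun _ => 0)
    hEAok hInit hPartNil (by intro e he; simp at he) hCardId
  have hRepInit : ∀ x, 0 ≤ x → x < n → pvRep (PySem.List.pyRange 0 n 1) x = x := by
    intro x h0 h1
    exact hid_range x h0 h1
  have hLInit : pvLInv n (PySem.List.pyRange 0 n 1) := by
    refine ⟨hlen_range, ?_⟩
    intro i h0 h1
    rw [hRepInit i h0 h1]
    exact ⟨h0, h1⟩
  have hPartNilB : pvPartEq n (pvRep (PySem.List.pyRange 0 n 1)) [] :=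
    pvPartEq_nil n _ hRepInit
  have hSwInit : (0 : Int) = n - (pvCard n (pvRep (PySem.List.pyRange 0 n 1)) : Int) := by
    rw [← pvCard_congr (R := fun i => i) (R' := pvRep (PySem.List.pyRange 0 n 1))
      (fun x h0 h1 => (hRepInit x h0 h1).symm)]
    omega
  obtain ⟨hLB, hPB, hswB⟩ := pvFoldB (n := n) EB [] (PySem.List.pyRange 0 n 1) 0
    hEBok hLInit hPartNilB (by intro e he; simp at he) hSwInit
  -- conclude: both values are n minus the number of components
  simp only [List.nil_append] at hPA hPB
  rw [hccA, hswB]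
  have hcards : pvCard n RA
      = pvCard n (pvRep (EB.foldl pvStepB (PySem.List.pyRange 0 n 1, 0)).1) := by
    apply pvCard_eq_of_iff
    intro x y hx0 hx hy0 hy
    rw [hPA x y hx0 hx hy0 hy, hPB x y hx0 hx hy0 hy]
    exact pvCl_iff_of_step_iff hstepiff x y
  rw [hcards]
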